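-- pv_equiv track=rewrite | github.com/pynadath/psychsim | pwl/keys.py | escapeKey
-- ===== SOURCE A (Python) =====
-- WORLD = '__WORLD__'
--
-- def isStateKey(key):
--     """
--     :returns: C{True} iff this key refers to a state feature
--     :rtype: bool
--     """
--     return '\'s ' in key
--
-- def state2feature(key):
--     """
--     :returns: the feature string from the given key
--     :rtype: str
--     """
--     index = key.find("'")
--     if index < 0:
--         return key
--     else:
--         return key[index+3:]
--
-- def state2agent(key):
--     """
--     :returns: the agent name from the given key
--     :rtype: str
--     """
--     index = key.find("'")
--     if index < 0:
--         return None
--     else: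
--         return key[:index]
--
-- def makePresent(key):
--     """
--     :returns: a reference to the given state features' current value
--     :rtype: str
--     """
--     if isinstance(key,set):
--         return {makePresent(k) for k in key}
--     elif key[-1] == "'":
--         return key[:-1]
--     else:
--         return key
--
-- def isFuture(key):
--     return len(key) > 0 and key[-1] == "'"
--
-- def isBeliefKey(key):
--     return '(' in key
--
-- def belief2believer(key):
--     return key[:key.index('(')]
--
-- def belief2key(key):
--     return key[key.index('(')+1:-1]
--
-- def escapeKey(key):
--     """
--     :returns: filename-ready version of the key
--     """
--     if not isinstance(key,str):
--         key = str(key)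
--     if isBeliefKey(key):
--         believer = belief2believer(key)
--         subkey = belief2key(key)
--         return 'Belief(%s)Of%s' % (escapeKey(subkey),believer)
--     future = isFuture(key)
--     if future:
--         key = makePresent(key)
--     if isStateKey(key):
--         agent = state2agent(key)
--         if agent == WORLD:
--             name = state2feature(key)
--         else:
--             name = '%sOf%s' % (state2feature(key),agent)
--     else:
--         name = key
--     return name.replace(' ','')
-- ===== SOURCE B (Python) =====
-- WORLD = '__WORLD__'
--
-- def escapeKey(key):
--     if not isinstance(key, str):
--         key = str(key)
--     believers = []
--     while '(' in key:
--         pre, _, rest = key.partition('(')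
--         believers.append(pre)
--         key = rest[:-1]
--     if key.endswith("'"):
--         key = key[:-1]
--     if "'s " in key:
--         agent, _, rest = key.partition("'")
--         feature = rest[2:]
--         name = feature if agent == WORLD else feature + 'Of' + agent
--     else:
--         name = key
--     name = name.replace(' ', '')
--     for believer in reversed(believers):
--         name = 'Belief(' + name + ')Of' + believer
--     return name
-- ===== Notes on version B (the rewrite author's own statement) =====
-- stated objective: alternative
-- what changed: Replaces A's recursion over nested belief keys with an iterative partition loop that peels all believer prefixes into a list, computes the innermost name once, and rewraps by folding over the collected believers in reverse.
import Mathlib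
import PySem

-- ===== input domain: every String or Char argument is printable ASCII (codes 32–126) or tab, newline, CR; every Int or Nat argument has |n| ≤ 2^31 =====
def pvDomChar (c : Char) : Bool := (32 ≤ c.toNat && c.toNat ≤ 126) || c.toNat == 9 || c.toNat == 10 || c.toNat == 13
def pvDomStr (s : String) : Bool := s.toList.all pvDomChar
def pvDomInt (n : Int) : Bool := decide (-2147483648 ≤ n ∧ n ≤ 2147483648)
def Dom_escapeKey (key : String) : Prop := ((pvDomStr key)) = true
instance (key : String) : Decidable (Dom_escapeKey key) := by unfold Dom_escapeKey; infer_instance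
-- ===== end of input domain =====

-- B peels belief layers iteratively (partition loop + rewrap) instead of recursing; alternative decomposition, same cost.


-- ===== PORT A =====
-- WORLD = '__WORLD__'
def pvWORLD : List Char := "__WORLD__".toList

-- isStateKey(key): "'s " in key
def pvIsStateKey (cs : List Char) : Bool := PySem.Chars.isIn "'s ".toList cs

-- state2feature(key)
def pvState2feature (cs : List Char) : List Char :=
  let index := PySem.Chars.find cs "'".toList
  if index < 0 then cs else PySem.List.slice cs (some (index + 3)) none

-- state2agent(key): returns None when no quote is present
def pvState2agent? (cs : List Char) : Option (List Char) :=
  let index := PySem.Chars.find cs "'".toList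
  if index < 0 then none else some (PySem.List.slice cs none (some index))

-- makePresent(key) on the str branch; key[-1] raises on "", but escapeKey only calls it
-- under isFuture(key), which guarantees key is nonempty, so this total form is exact there.
def pvMakePresent (cs : List Char) : List Char :=
  if PySem.List.pyGet? cs (-1) = some '\'' then PySem.List.slice cs none (some (-1)) else cs

-- isFuture(key): len(key) > 0 and key[-1] == "'"
def pvIsFuture (cs : List Char) : Bool :=
  decide (0 < cs.length) && (PySem.List.pyGet? cs (-1) == some '\'')

-- isBeliefKey(key): '(' in key
def pvIsBeliefKey (cs : List Char) : Bool := PySem.Chars.isIn "(".toList cs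

-- belief2believer(key): key[:key.index('(')]; index = find since callers guarantee '(' present
def pvBelief2believer (cs : List Char) : List Char :=
  PySem.List.slice cs none (some (PySem.Chars.find cs "(".toList))

-- belief2key(key): key[key.index('(')+1:-1]
def pvBelief2key (cs : List Char) : List Char :=
  PySem.List.slice cs (some (PySem.Chars.find cs "(".toList + 1)) (some (-1))

-- termination helper for the recursive call (cited by decreasing_by)
theorem pvBelief2key_length_lt (cs : List Char) (h : pvIsBeliefKey cs = true) :
    (pvBelief2key cs).length < cs.length := by
  have hne : cs ≠ [] := by
    rintro rfl
    simp [pvIsBeliefKey, PySem.Chars.isIn, PySem.Chars.find, PySem.Chars.find.go] at h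
  have hlen : 1 ≤ cs.length := List.length_pos_iff.mpr hne
  simp only [pvBelief2key, PySem.List.slice, PySem.List.clampIdx]
  split_ifs with h1 h2 h3 <;> simp_all <;> omega

def escapeKeyChars (cs : List Char) : List Char :=
  if h : pvIsBeliefKey cs = true then
    let believer := pvBelief2believer cs
    let subkey := pvBelief2key cs
    "Belief(".toList ++ escapeKeyChars subkey ++ ")Of".toList ++ believer
  else
    let cs1 := if pvIsFuture cs then pvMakePresent cs else cs
    if pvIsStateKey cs1 then
      let name :=
        if pvState2agent? cs1 = some pvWORLD then pvState2feature cs1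
        else pvState2feature cs1 ++ "Of".toList ++
             -- '%s' % agent; agent = None is unreachable here since isStateKey holds
             ((pvState2agent? cs1).getD "None".toList)
      PySem.Chars.replace name " ".toList []
    else
      PySem.Chars.replace cs1 " ".toList []
termination_by cs.length
decreasing_by exact pvBelief2key_length_lt cs h

def escapeKey (key : String) : String := String.mk (escapeKeyChars key.toList)

-- ===== PORT B =====
-- the while loop: peel 'believer(' layers, collecting believers outermost-first
def altPeel (cs : List Char) : List (List Char) × List Char :=
  if h : '(' ∈ cs then
    let pre := cs.takeWhile (· ≠ '(')                       -- pre, _, rest = key.partition('(')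
    let rest := (cs.dropWhile (· ≠ '(')).drop 1
    let (bs, base) := altPeel rest.dropLast                 -- key = rest[:-1]
    (pre :: bs, base)
  else ([], cs)
termination_by cs.length
decreasing_by
  have hne : cs ≠ [] := by rintro rfl; simp at h
  have := List.length_dropWhile_le (· ≠ '(') cs
  simp only [List.length_dropLast, List.length_drop]
  have : 1 ≤ cs.length := List.length_pos_iff.mpr hne
  omega

-- the innermost name: future strip, state split via partition, replace
def altBase (cs : List Char) : List Char :=
  let cs1 := if PySem.Chars.endswith cs "'".toList then cs.dropLast else cs
  if PySem.Chars.isIn "'s ".toList cs1 then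
    let agent := cs1.takeWhile (· ≠ '\'')                   -- agent, _, rest = key.partition("'")
    let rest := (cs1.dropWhile (· ≠ '\'')).drop 1
    let feature := rest.drop 2                              -- rest[2:]
    let name := if agent = "__WORLD__".toList then feature
                else feature ++ "Of".toList ++ agent
    PySem.Chars.replace name " ".toList []
  else
    PySem.Chars.replace cs1 " ".toList []

def escapeKey_alt (key : String) : String :=
  let (believers, base) := altPeel key.toList
  let name := altBase base
  -- for believer in reversed(believers): name = 'Belief(' + name + ')Of' + believer
  String.mk (believers.reverse.foldl
    (fun name b => "Belief(".toList ++ name ++ ")Of".toList ++ b) name)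

-- ===== PRECONDITION & SPEC =====
def Spec_escapeKey (key : String) (out : String) : Prop := out = escapeKey_alt key
instance (key : String) (out : String) : Decidable (Spec_escapeKey key out) := by unfold Spec_escapeKey; infer_instance

-- ===== CLAIM (what is proved, stated in full; the proofs are below) =====
def Claim_equal_escapeKey : Prop := ∀ (key : String), Dom_escapeKey key → Spec_escapeKey key (escapeKey key)

-- ===== LEMMAS AND PROOFS =====

-- find with a single-character needle is the takeWhile prefix length
theorem pvGo_singleton (c : Char) (cs : List Char) (k : Nat) :
    PySem.Chars.find.go [c] cs k =
      if c ∈ cs then ((k + (cs.takeWhile (· ≠ c)).length : Nat) : Int) else -1 := by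
  induction cs generalizing k with
  | nil => simp [PySem.Chars.find.go]
  | cons h t ih =>
    rw [PySem.Chars.find.go]
    by_cases hc : h = c
    · subst hc
      simp [List.isPrefixOf, List.takeWhile]
    · have : ([c].isPrefixOf (h :: t)) = false := by
        simp [List.isPrefixOf]; exact fun e => (hc e.symm).elim
      rw [this]
      have hb : (decide (h ≠ c)) = true := by simpa using hc
      simp only [ih, List.mem_cons, List.takeWhile, hb]
      simp only [show (c = h) ↔ False from ⟨fun e => hc e.symm, False.elim⟩, false_or]
      split_ifs <;> simp_all <;> omega

theorem pvFind_singleton (cs : List Char) (c : Char) :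
    PySem.Chars.find cs [c] =
      if c ∈ cs then (((cs.takeWhile (· ≠ c)).length : Nat) : Int) else -1 := by
  simpa using pvGo_singleton c cs 0

theorem pvDropWhile_eq_drop (p : Char → Bool) (cs : List Char) :
    cs.dropWhile p = cs.drop (cs.takeWhile p).length := by
  have h := List.takeWhile_append_dropWhile (p := p) (l := cs)
  calc cs.dropWhile p
      = (cs.takeWhile p ++ cs.dropWhile p).drop (cs.takeWhile p).length := by
        rw [List.drop_left]
    _ = cs.drop (cs.takeWhile p).length := by rw [h]

theorem pvSlice_to_neg_one (cs : List Char) :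
    PySem.List.slice cs none (some (-1)) = cs.dropLast := by
  simp [PySem.List.slice, PySem.List.clampIdx, List.dropLast_eq_take]
  cases cs <;> simp

theorem pvSlice_to_natCast (cs : List Char) (n : Nat) :
    PySem.List.slice cs none (some (n : Int)) = cs.take n := by
  simp only [PySem.List.slice, PySem.List.clampIdx,
    if_neg (show ¬((n : Int) < 0) by omega), Int.toNat_natCast]
  simp only [List.drop_zero, Nat.sub_zero]
  by_cases h : n ≤ cs.length
  · rw [Nat.min_eq_left h]
  · rw [Nat.min_eq_right (by omega), List.take_length,
      List.take_of_length_le (by omega)]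

theorem pvSlice_from_natCast (cs : List Char) (n : Nat) :
    PySem.List.slice cs (some (n : Int)) none = cs.drop n := by
  simp only [PySem.List.slice, PySem.List.clampIdx,
    if_neg (show ¬((n : Int) < 0) by omega), Int.toNat_natCast]
  by_cases h : n ≤ cs.length
  · rw [Nat.min_eq_left h, List.take_of_length_le (by simp)]
  · rw [Nat.min_eq_right (by omega)]
    rw [List.drop_of_length_le (by omega), List.drop_of_length_le (by omega)]
    simp

theorem pvSlice_mid_neg_one (cs : List Char) (n : Nat) :
    PySem.List.slice cs (some (n : Int)) (some (-1)) = (cs.drop n).dropLast := by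
  simp only [PySem.List.slice, PySem.List.clampIdx,
    if_neg (show ¬((n : Int) < 0) by omega), Int.toNat_natCast,
    if_pos (show (-1 : Int) < 0 by omega)]
  rw [List.dropLast_eq_take]
  by_cases h0 : cs.length = 0
  · simp [List.eq_nil_of_length_eq_zero h0]
  · rw [if_neg (by omega)]
    have h2 : ((cs.length : Int) + -1).toNat = cs.length - 1 := by omega
    rw [h2]
    by_cases h : n ≤ cs.length
    · rw [Nat.min_eq_left h]
      congr 1
      simp [List.length_drop]
      omega
    · rw [Nat.min_eq_right (by omega)]
      rw [List.drop_of_length_le (by omega), List.drop_of_length_le (by omega)]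
      simp

theorem pvPyGet_neg_one (cs : List Char) :
    PySem.List.pyGet? cs (-1) = cs.getLast? := by
  simp only [PySem.List.pyGet?, PySem.List.pyIdx?]
  cases cs with
  | nil => simp
  | cons h t =>
    rw [if_neg (by omega : ¬(0:Int) ≤ -1),
      if_pos (show -((h::t).length : Int) ≤ -1 by simp)]
    have h1 : (h::t).length - (-(-1:Int)).toNat = (h::t).length - 1 := by norm_num
    rw [h1, Option.bind_some, List.getLast?_eq_getElem?]

theorem pvSuffix_singleton (c : Char) (l : List Char) :
    [c] <:+ l ↔ l.getLast? = some c := by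
  constructor
  · rintro ⟨t, rfl⟩
    simp
  · intro h
    rcases List.getLast?_eq_some_iff.mp h with ⟨ys, rfl⟩
    exact ⟨ys, rfl⟩

theorem pvIsBelief_iff (cs : List Char) : pvIsBeliefKey cs = true ↔ '(' ∈ cs := by
  rw [pvIsBeliefKey, PySem.Chars.isIn_iff_infix]
  exact List.singleton_infix_iff '(' cs

theorem pvIsFuture_eq (cs : List Char) :
    pvIsFuture cs = PySem.Chars.endswith cs "'".toList := by
  rw [Bool.eq_iff_iff]
  rw [show ("'".toList) = ['\''] from rfl]
  rw [PySem.Chars.endswith_iff, pvSuffix_singleton]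
  simp only [pvIsFuture, Bool.and_eq_true, decide_eq_true_eq, beq_iff_eq, pvPyGet_neg_one]
  constructor
  · rintro ⟨-, h⟩; exact h
  · intro h
    refine ⟨?_, h⟩
    rcases cs with _ | ⟨a, t⟩
    · simp at h
    · simp

theorem pvMakePresent_of_last (cs : List Char) (h : cs.getLast? = some '\'') :
    pvMakePresent cs = cs.dropLast := by
  rw [pvMakePresent, pvPyGet_neg_one, if_pos (by rw [h]), pvSlice_to_neg_one]

-- the innermost (no-belief) branch of A agrees with altBase
theorem pvBase_eq (cs : List Char) :
    (let cs1 := if pvIsFuture cs then pvMakePresent cs else cs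
     if pvIsStateKey cs1 then
       PySem.Chars.replace
         (if pvState2agent? cs1 = some pvWORLD then pvState2feature cs1
          else pvState2feature cs1 ++ "Of".toList ++
               ((pvState2agent? cs1).getD "None".toList)) " ".toList []
     else PySem.Chars.replace cs1 " ".toList []) = altBase cs := by
  have hcs1 : (if pvIsFuture cs then pvMakePresent cs else cs)
      = (if PySem.Chars.endswith cs "'".toList then cs.dropLast else cs) := by
    rw [← pvIsFuture_eq]
    by_cases hf : pvIsFuture cs = true
    · rw [if_pos hf, if_pos hf]
      have hl : cs.getLast? = some '\'' := by
        have h2 := hf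
        simp only [pvIsFuture, Bool.and_eq_true, beq_iff_eq, pvPyGet_neg_one] at h2
        exact h2.2
      exact pvMakePresent_of_last cs hl
    · rw [if_neg hf, if_neg hf]
  rw [altBase]
  simp only [← hcs1]
  by_cases hs : pvIsStateKey (if pvIsFuture cs then pvMakePresent cs else cs) = true
  · set cs1 := if pvIsFuture cs then pvMakePresent cs else cs with hdef
    rw [if_pos hs]
    rw [pvIsStateKey] at hs
    rw [if_pos hs]
    have hmem : '\'' ∈ cs1 := by
      rw [PySem.Chars.isIn_iff_infix] at hs
      exact hs.subset (by decide)
    have hfind : PySem.Chars.find cs1 "'".toList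
        = (((cs1.takeWhile (· ≠ '\'')).length : Nat) : Int) := by
      rw [show ("'".toList) = ['\''] from rfl, pvFind_singleton, if_pos hmem]
    have hagent : pvState2agent? cs1 = some (cs1.takeWhile (· ≠ '\'')) := by
      rw [pvState2agent?]
      simp only [hfind, if_neg (show ¬((((cs1.takeWhile (· ≠ '\'')).length : Nat) : Int) < 0) by omega)]
      rw [pvSlice_to_natCast]
      rw [(List.prefix_iff_eq_take.mp (List.takeWhile_prefix _)).symm]
    have hfeat : pvState2feature cs1 = ((cs1.dropWhile (· ≠ '\'')).drop 1).drop 2 := by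
      rw [pvState2feature]
      simp only [hfind, if_neg (show ¬((((cs1.takeWhile (· ≠ '\'')).length : Nat) : Int) < 0) by omega)]
      rw [show (((cs1.takeWhile (· ≠ '\'')).length : Int) + 3)
          = (((cs1.takeWhile (· ≠ '\'')).length + 3 : Nat) : Int) by push_cast; ring]
      rw [pvSlice_from_natCast, pvDropWhile_eq_drop, List.drop_drop, List.drop_drop]
    rw [hagent, hfeat]
    simp only [Option.getD_some, Option.some_inj]
    rfl
  · rw [if_neg hs]
    rw [pvIsStateKey] at hs
    rw [if_neg hs]

theorem pvBelief2believer_eq {cs : List Char} (h : '(' ∈ cs) :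
    pvBelief2believer cs = cs.takeWhile (· ≠ '(') := by
  rw [pvBelief2believer, show ("(".toList) = ['('] from rfl, pvFind_singleton, if_pos h,
    pvSlice_to_natCast, (List.prefix_iff_eq_take.mp (List.takeWhile_prefix _)).symm]

theorem pvBelief2key_eq {cs : List Char} (h : '(' ∈ cs) :
    pvBelief2key cs = ((cs.dropWhile (· ≠ '(')).drop 1).dropLast := by
  rw [pvBelief2key, show ("(".toList) = ['('] from rfl, pvFind_singleton, if_pos h]
  rw [show (((cs.takeWhile (· ≠ '(')).length : Int) + 1)
      = (((cs.takeWhile (· ≠ '(')).length + 1 : Nat) : Int) by push_cast; ring]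
  rw [pvSlice_mid_neg_one, pvDropWhile_eq_drop, List.drop_drop, Nat.add_comm]

theorem pvAltPeel_pos {cs : List Char} (h : '(' ∈ cs) :
    altPeel cs = ((cs.takeWhile (· ≠ '(')) ::
        (altPeel ((cs.dropWhile (· ≠ '(')).drop 1).dropLast).1,
      (altPeel ((cs.dropWhile (· ≠ '(')).drop 1).dropLast).2) := by
  rw [altPeel]
  simp [h]

theorem pvAltPeel_neg {cs : List Char} (h : ¬ '(' ∈ cs) :
    altPeel cs = ([], cs) := by
  rw [altPeel]
  simp [h]

theorem pvChars_eq (cs : List Char) :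
    escapeKeyChars cs =
      (altPeel cs).1.reverse.foldl
        (fun name b => "Belief(".toList ++ name ++ ")Of".toList ++ b)
        (altBase (altPeel cs).2) := by
  induction cs using escapeKeyChars.induct with
  | case1 cs h _ ih =>
    have hmem : '(' ∈ cs := (pvIsBelief_iff cs).mp h
    rw [escapeKeyChars, dif_pos h, pvAltPeel_pos hmem]
    simp only [List.reverse_cons, List.foldl_append, List.foldl_cons, List.foldl_nil]
    rw [pvBelief2believer_eq hmem, ← pvBelief2key_eq hmem]
    exact congrArg (fun x => "Belief(".toList ++ x ++ ")Of".toList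
      ++ cs.takeWhile (· ≠ '(')) ih
  | case2 cs h _ _ =>
    have hmem : ¬ '(' ∈ cs := fun hm => h ((pvIsBelief_iff cs).mpr hm)
    rw [escapeKeyChars, dif_neg h, pvAltPeel_neg hmem]
    simp only [List.reverse_nil, List.foldl_nil]
    exact pvBase_eq cs
  | case3 cs h _ _ =>
    have hmem : ¬ '(' ∈ cs := fun hm => h ((pvIsBelief_iff cs).mpr hm)
    rw [escapeKeyChars, dif_neg h, pvAltPeel_neg hmem]
    simp only [List.reverse_nil, List.foldl_nil]
    exact pvBase_eq cs

-- ===== VERDICT (by name: the statement is the Claim_ definition above) =====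
theorem escapeKey_spec : Claim_equal_escapeKey := by
  intro key _
  unfold Spec_escapeKey escapeKey escapeKey_alt
  rw [pvChars_eq]
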